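-- pv_equiv track=rewrite | github.com/Yolgie/AdventOfCode2017 | day09.py | escapeInput
-- ===== SOURCE A (Python) =====
-- def escapeInput(raw_row):
--     result = []
--     escape = False
--     for character in raw_row:
--         if escape:
--             escape = False
--             continue
--         if character == '!':
--             escape = True
--             continue
--         result.append(character)
--     return result
-- ===== SOURCE B (Python) =====
-- import re
--
--
-- def escapeInput(raw_row):
--     return list(re.sub(r'![\s\S]?', '', raw_row))
-- ===== Notes on version B (the rewrite author's own statement) =====
-- stated objective: idiomatic
-- what changed: Replaced the explicit loop with a boolean escape flag by a single regex substitution (pattern ![\s\S]? replaced by nothing) wrapped in list().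
import Mathlib
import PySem

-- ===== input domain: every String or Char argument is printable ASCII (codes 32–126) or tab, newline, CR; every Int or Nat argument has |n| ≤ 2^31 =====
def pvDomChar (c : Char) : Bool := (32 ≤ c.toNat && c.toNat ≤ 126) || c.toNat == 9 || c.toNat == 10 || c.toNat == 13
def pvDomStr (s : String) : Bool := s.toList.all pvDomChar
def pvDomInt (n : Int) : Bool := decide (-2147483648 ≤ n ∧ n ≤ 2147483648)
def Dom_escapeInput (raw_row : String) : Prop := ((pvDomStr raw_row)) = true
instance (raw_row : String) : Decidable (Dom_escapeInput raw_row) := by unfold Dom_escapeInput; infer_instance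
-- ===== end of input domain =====

-- B replaces A's escape-flag loop by a single regex substitution re.sub with pattern ![\s\S]? and empty replacement; idiomatic, same cost.


-- ===== PORT A =====
-- A's for-loop with mutable `escape` flag and `result.append`, as a recursion over the characters with the same state.
def escapeLoopA : List Char → Bool → List String → List String
  | [], _, result => result
  | c :: rest, escape, result =>
    if escape then escapeLoopA rest false result
    else if c = '!' then escapeLoopA rest true result
    else escapeLoopA rest false (result ++ [String.ofList [c]])

def escapeInput (raw_row : String) : List String :=
  escapeLoopA raw_row.toList false []

-- ===== PORT B =====
-- re.sub with pattern ![\s\S]? and empty replacement: leftmost scan that deletes each '!' together with the (optional) following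
-- character; list() of the result. Ported by hand: this recursion is exactly the leftmost non-overlapping match rule.
def regexSubB : List Char → List String
  | [] => []
  | c :: rest =>
    if c = '!' then regexSubB (rest.drop 1)
    else String.ofList [c] :: regexSubB rest
termination_by l => l.length
decreasing_by
  all_goals simp

def escapeInput_alt (raw_row : String) : List String :=
  regexSubB raw_row.toList

-- ===== PRECONDITION & SPEC =====
def Spec_escapeInput (raw_row : String) (out : List String) : Prop := out = escapeInput_alt raw_row
instance (raw_row : String) (out : List String) : Decidable (Spec_escapeInput raw_row out) := by unfold Spec_escapeInput; infer_instance

-- ===== CLAIM (what is proved, stated in full; the proofs are below) =====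
def Claim_equal_escapeInput : Prop := ∀ (raw_row : String), Dom_escapeInput raw_row → Spec_escapeInput raw_row (escapeInput raw_row)

-- ===== LEMMAS AND PROOFS =====
theorem escapeLoopA_eq_regexSubB_aux (n : Nat) :
    ∀ l : List Char, l.length ≤ n → ∀ res : List String,
      escapeLoopA l false res = res ++ regexSubB l := by
  induction n with
  | zero =>
    intro l hl res
    match l with
    | [] => simp [escapeLoopA, regexSubB]
    | _ :: _ => simp at hl
  | succ n ih =>
    intro l hl res
    match l with
    | [] => simp [escapeLoopA, regexSubB]
    | c :: rest =>
      by_cases hc : c = '!'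
      · subst hc
        match rest with
        | [] => simp [escapeLoopA, regexSubB]
        | c' :: rest' =>
          have h := ih rest' (by simp at hl ⊢; omega) res
          simp [escapeLoopA, regexSubB, h]
      · have h := ih rest (by simp at hl ⊢; omega)
        simp [escapeLoopA, regexSubB, hc]
        rw [h (res ++ [String.ofList [c]])]
        simp

theorem escapeLoopA_eq_regexSubB (l : List Char) :
    ∀ res : List String, escapeLoopA l false res = res ++ regexSubB l :=
  escapeLoopA_eq_regexSubB_aux l.length l (le_refl _)

-- ===== VERDICT (by name: the statement is the Claim_ definition above) =====
theorem escapeInput_spec : Claim_equal_escapeInput := by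
  intro raw_row _
  unfold Spec_escapeInput escapeInput escapeInput_alt
  simpa using escapeLoopA_eq_regexSubB raw_row.toList []
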